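-- pv_equiv track=rewrite | github.com/uenchang-boop/ai-python-tutor02 | parsers/function_parser.py | _remove_bad_block
-- ===== SOURCE A (Python) =====
-- def _remove_bad_block(source_code: str, error_line: int) -> str:
--     """
--     移除包含 error_line 的頂層區塊（def / class / 其他 indent=0 的段落）。
--     回傳去掉該區塊後的程式碼字串。
--     """
--     lines = source_code.splitlines()
--     n = len(lines)
--     if n == 0:
--         return ""
--
--     err_idx = min(error_line - 1, n - 1)  # 0-based
--
--     # 向前找到含錯誤行的頂層起始行（indent == 0 的非空行）
--     start = 0
--     for i in range(err_idx, -1, -1):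
--         stripped = lines[i].lstrip()
--         if stripped and len(lines[i]) - len(stripped) == 0:
--             start = i
--             break
--
--     # 向後找到下一個頂層起始行（即本區塊的結束位置）
--     end = n  # exclusive
--     for i in range(start + 1, n):
--         stripped = lines[i].lstrip()
--         if stripped and len(lines[i]) - len(stripped) == 0:
--             end = i
--             break
--
--     return "\n".join(lines[:start] + lines[end:])
-- ===== SOURCE B (Python) =====
-- def _remove_bad_block(source_code: str, error_line: int) -> str:
--     lines = source_code.splitlines()
--     n = len(lines)
--     if n == 0:
--         return ""
--     err_idx = min(error_line - 1, n - 1)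
--     tops = [i for i, ln in enumerate(lines) if ln[:1].strip()]
--     start = max((t for t in tops if t <= err_idx), default=0)
--     end = min((t for t in tops if t > start), default=n)
--     return "\n".join(lines[:start] + lines[end:])
-- ===== Notes on version B (the rewrite author's own statement) =====
-- stated objective: simpler
-- what changed: A scans backward from the error line with a break to find the block start and then forward with a second break to find its end; B makes one forward pass collecting the indices of all top-level lines and picks start = max of those <= err_idx (default 0) and end = min of those > start (default n).
import Mathlib
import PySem

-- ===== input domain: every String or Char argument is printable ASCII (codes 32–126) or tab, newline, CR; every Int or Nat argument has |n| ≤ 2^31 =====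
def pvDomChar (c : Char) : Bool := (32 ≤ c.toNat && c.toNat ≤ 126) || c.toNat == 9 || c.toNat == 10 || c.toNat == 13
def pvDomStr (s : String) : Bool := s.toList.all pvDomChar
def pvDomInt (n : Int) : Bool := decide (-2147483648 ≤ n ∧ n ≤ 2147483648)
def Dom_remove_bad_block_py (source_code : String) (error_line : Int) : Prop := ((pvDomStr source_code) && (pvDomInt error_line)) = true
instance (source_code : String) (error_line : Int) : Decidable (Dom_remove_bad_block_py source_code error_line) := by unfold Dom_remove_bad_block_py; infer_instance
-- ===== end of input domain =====

-- B replaces A's two directional break-scans (backward for the block start, forward for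
-- its end) by one pass collecting all top-level line indices followed by a max/min
-- selection; objective: simpler. Return values proved equal on the whole domain.

-- ===== PORT A =====
-- A's loop test: stripped = lines[i].lstrip(); stripped and len(lines[i]) - len(stripped) == 0
def pvTopA (l : String) : Bool :=
  let stripped := PySem.Str.lstrip l
  decide (stripped ≠ "") && (PySem.Str.len l - PySem.Str.len stripped == 0)

def remove_bad_block_py (source_code : String) (error_line : Int) : String :=
  let lines := PySem.Str.splitlines source_code
  let n : Int := (lines.length : Int)
  if n = 0 then ""
  else
    let errIdx : Int := min (error_line - 1) (n - 1)
    let start : Int :=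
      ((PySem.List.pyRange errIdx (-1) (-1)).find?
        (fun i => pvTopA (PySem.List.pyGetD lines i ""))).getD 0
    let stop : Int :=
      ((PySem.List.pyRange (start + 1) n 1).find?
        (fun i => pvTopA (PySem.List.pyGetD lines i ""))).getD n
    PySem.Str.join "\n" (PySem.List.slice lines none (some start) ++ PySem.List.slice lines (some stop) none)


-- ===== PORT B =====
-- B's test: ln[:1].strip() is truthy
def pvTopB (l : String) : Bool :=
  decide (PySem.Str.strip (PySem.Str.slice l none (some 1)) ≠ "")

def remove_bad_block_py_alt (source_code : String) (error_line : Int) : String :=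
  let lines := PySem.Str.splitlines source_code
  let n : Int := (lines.length : Int)
  if n = 0 then ""
  else
    let errIdx : Int := min (error_line - 1) (n - 1)
    let tops : List Int := ((PySem.List.enumerate lines).filter (fun p => pvTopB p.2)).map (·.1)
    let start : Int := (PySem.List.max? (tops.filter (fun t => decide (t ≤ errIdx))) id).getD 0
    let stop : Int := (PySem.List.min? (tops.filter (fun t => decide (start < t))) id).getD n
    PySem.Str.join "\n" (PySem.List.slice lines none (some start) ++ PySem.List.slice lines (some stop) none)


-- ===== PRECONDITION & SPEC =====
def Spec_remove_bad_block_py (source_code : String) (error_line : Int) (out : String) : Prop := out = remove_bad_block_py_alt source_code error_line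
instance (source_code : String) (error_line : Int) (out : String) : Decidable (Spec_remove_bad_block_py source_code error_line out) := by unfold Spec_remove_bad_block_py; infer_instance

-- ===== CLAIM (what is proved, stated in full; the proofs are below) =====
def Claim_equal_remove_bad_block_py : Prop := ∀ (source_code : String) (error_line : Int), Dom_remove_bad_block_py source_code error_line → Spec_remove_bad_block_py source_code error_line (remove_bad_block_py source_code error_line)

-- ===== LEMMAS AND PROOFS =====

theorem pv_str_ne (s : String) : (decide (s ≠ "")) = (decide (s.toList ≠ [])) := by simp

theorem pvTop_chars (cs : List Char) :
    (decide (PySem.Chars.lstrip cs ≠ []) && (((cs.length : Int) - ((PySem.Chars.lstrip cs).length : Int)) == 0))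
    = decide (PySem.Chars.strip (PySem.Chars.slice cs none (some 1)) ≠ []) := by
  cases cs with
  | nil => rfl
  | cons c cs =>
    have hsl : PySem.Chars.slice (c :: cs) none (some 1) = [c] := by
      rw [PySem.Chars.slice_eq_listSlice, PySem.List.slice_to _ (by norm_num)]
      simp
    rw [hsl]
    by_cases hs : PySem.Chars.isspace c = true
    · have hlen := List.length_dropWhile_le PySem.Chars.isspace cs
      simp [PySem.Chars.lstrip, PySem.Chars.strip, PySem.Chars.rstrip, List.dropWhile, hs]
      omega
    · simp [PySem.Chars.lstrip, PySem.Chars.strip, PySem.Chars.rstrip, List.dropWhile, hs]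

theorem pvTop_eq (l : String) : pvTopA l = pvTopB l := by
  simp only [pvTopA, pvTopB]
  rw [pv_str_ne, pv_str_ne, PySem.Str.toList_strip, PySem.Str.toList_slice,
      PySem.Str.toList_lstrip, PySem.Str.len_eq, PySem.Str.len_eq, PySem.Str.toList_lstrip]
  exact pvTop_chars l.toList

theorem pv_mem_tops (lines : List String) (i : Int) :
    (i ∈ ((PySem.List.enumerate lines).filter (fun p => pvTopB p.2)).map (·.1)) ↔
      (0 ≤ i ∧ i < (lines.length : Int) ∧ pvTopA (PySem.List.pyGetD lines i "") = true) := by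
  simp only [List.mem_map, List.mem_filter]
  constructor
  · rintro ⟨⟨j, s⟩, ⟨hmem, htop⟩, rfl⟩
    rw [PySem.List.mem_enumerate_iff] at hmem
    obtain ⟨k, hk, heq⟩ := hmem
    obtain ⟨h1, h2⟩ := Prod.mk.injEq .. ▸ heq
    simp only at h1 h2 ⊢
    subst h1
    refine ⟨by omega, by omega, ?_⟩
    rw [PySem.List.pyGetD_eq_getElem lines "" (by omega) (by simpa using hk)]
    rw [pvTop_eq]
    simpa [h2] using htop
  · rintro ⟨h0, h1, hP⟩
    have hk : i.toNat < lines.length := by omega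
    refine ⟨(i, lines[i.toNat]), ⟨?_, ?_⟩, rfl⟩
    · rw [PySem.List.mem_enumerate_iff]
      exact ⟨i.toNat, hk, by simp; omega⟩
    · rw [PySem.List.pyGetD_eq_getElem lines "" h0 (by omega), pvTop_eq] at hP
      exact hP

theorem pv_find_down_some {P : Int → Bool} (k : Nat) (i : Int) :
    ((PySem.List.pyRange (k : Int) (-1) (-1)).find? P = some i) ↔
      (0 ≤ i ∧ i ≤ (k : Int) ∧ P i = true ∧ ∀ j : Int, i < j → j ≤ (k : Int) → P j = false) := by
  induction k with
  | zero =>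
    rw [show ((0:Nat):Int) = 0 by norm_num,
        PySem.List.pyRange_neg_one_cons (by norm_num : (-1:Int) < 0),
        show (0:Int) - 1 = -1 by ring,
        PySem.List.pyRange_neg_one_eq_nil (le_refl (-1))]
    cases hP : P 0 with
    | false =>
      simp only [List.find?, hP]
      constructor
      · intro h; exact absurd h (by simp)
      · rintro ⟨h0, h1, h2, _⟩
        have : i = 0 := by omega
        rw [this] at h2; rw [h2] at hP; exact absurd hP (by simp)
    | true =>
      simp only [List.find?, hP]
      constructor
      · rintro ⟨rfl⟩
        exact ⟨le_refl 0, le_refl 0, hP, fun j hj1 hj2 => absurd (lt_of_lt_of_le hj1 hj2) (lt_irrefl 0)⟩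
      · rintro ⟨h0, h1, _, _⟩
        have : i = 0 := le_antisymm h1 h0
        rw [this]
  | succ k ih =>
    rw [show ((k+1:Nat):Int) = (k:Int)+1 by push_cast; ring,
        PySem.List.pyRange_neg_one_cons (by omega : (-1:Int) < (k:Int)+1),
        show (k:Int)+1-1 = (k:Int) by ring]
    cases hP : P ((k:Int)+1) with
    | true =>
      rw [List.find?_cons_of_pos hP]
      constructor
      · rintro ⟨rfl⟩
        exact ⟨by omega, le_refl _, hP, fun j hj1 hj2 => by omega⟩
      · rintro ⟨h0, h1, h2, h3⟩
        rcases lt_or_eq_of_le h1 with h | h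
        · have := h3 ((k:Int)+1) (by omega) (le_refl _)
          rw [this] at hP; exact absurd hP (by simp)
        · rw [h]
    | false =>
      rw [List.find?_cons_of_neg (by simp [hP]), ih]
      constructor
      · rintro ⟨h0, h1, h2, h3⟩
        refine ⟨h0, by omega, h2, fun j hj1 hj2 => ?_⟩
        rcases lt_or_eq_of_le hj2 with h | h
        · exact h3 j hj1 (by omega)
        · rw [h]; exact hP
      · rintro ⟨h0, h1, h2, h3⟩
        have hik : i ≤ (k:Int) := by
          rcases lt_or_eq_of_le h1 with h | h
          · omega
          · rw [h] at h2; rw [h2] at hP; exact absurd hP (by simp)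
        exact ⟨h0, hik, h2, fun j hj1 hj2 => h3 j hj1 (by omega)⟩

theorem pv_find_down_none {P : Int → Bool} (k : Nat) :
    ((PySem.List.pyRange (k : Int) (-1) (-1)).find? P = none) ↔
      (∀ j : Int, 0 ≤ j → j ≤ (k : Int) → P j = false) := by
  rw [List.find?_eq_none]
  constructor
  · intro h j hj0 hjk
    have hmem : j ∈ PySem.List.pyRange (k : Int) (-1) (-1) := by
      rw [PySem.List.mem_pyRange_neg_one]; omega
    have := h j hmem
    simpa using this
  · intro h x hx
    rw [PySem.List.mem_pyRange_neg_one] at hx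
    simp [h x (by omega) (by omega)]

theorem pv_find_up_aux {P : Int → Bool} (f : Nat) : ∀ (a i : Int),
    ((PySem.List.pyRange a (a + f) 1).find? P = some i) ↔
      (a ≤ i ∧ i < a + f ∧ P i = true ∧ ∀ j : Int, a ≤ j → j < i → P j = false) := by
  induction f with
  | zero =>
    intro a i
    rw [show a + ((0:Nat):Int) = a by norm_num, PySem.List.pyRange_one_eq_nil (le_refl a)]
    simp only [List.find?]
    constructor
    · intro h; exact absurd h (by simp)
    · rintro ⟨h0, h1, _, _⟩; omega
  | succ f ih =>
    intro a i
    rw [PySem.List.pyRange_one_cons (by push_cast; omega : a < a + ((f+1:Nat):Int))]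
    cases hP : P a with
    | true =>
      rw [List.find?_cons_of_pos hP]
      constructor
      · rintro ⟨rfl⟩
        exact ⟨le_refl _, by push_cast; omega, hP, fun j hj1 hj2 => by omega⟩
      · rintro ⟨h0, h1, h2, h3⟩
        rcases lt_or_eq_of_le h0 with h | h
        · have := h3 a (le_refl _) h
          rw [this] at hP; exact absurd hP (by simp)
        · rw [← h]
    | false =>
      rw [List.find?_cons_of_neg (by simp [hP])]
      have := ih (a+1) i
      rw [show a + 1 + ((f:Nat):Int) = a + ((f+1:Nat):Int) by push_cast; ring] at this
      rw [this]
      constructor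
      · rintro ⟨h0, h1, h2, h3⟩
        exact ⟨by omega, h1, h2, fun j hj1 hj2 => by
          rcases lt_or_eq_of_le hj1 with h | h
          · exact h3 j (by omega) hj2
          · rw [← h]; exact hP⟩
      · rintro ⟨h0, h1, h2, h3⟩
        have hai : a + 1 ≤ i := by
          rcases lt_or_eq_of_le h0 with h | h
          · omega
          · rw [← h] at h2; rw [h2] at hP; exact absurd hP (by simp)
        exact ⟨hai, h1, h2, fun j hj1 hj2 => h3 j (by omega) hj2⟩

theorem pv_find_up_some {P : Int → Bool} (a b i : Int) (hab : a ≤ b) :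
    ((PySem.List.pyRange a b 1).find? P = some i) ↔
      (a ≤ i ∧ i < b ∧ P i = true ∧ ∀ j : Int, a ≤ j → j < i → P j = false) := by
  have h := pv_find_up_aux (P := P) (b - a).toNat a i
  rw [show a + (((b-a).toNat:Nat):Int) = b by omega] at h
  exact h

theorem pv_find_up_none {P : Int → Bool} (a b : Int) :
    ((PySem.List.pyRange a b 1).find? P = none) ↔
      (∀ j : Int, a ≤ j → j < b → P j = false) := by
  rw [List.find?_eq_none]
  constructor
  · intro h j hj0 hjk
    have hmem : j ∈ PySem.List.pyRange a b 1 := by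
      rw [PySem.List.mem_pyRange_one]; omega
    simpa using h j hmem
  · intro h x hx
    rw [PySem.List.mem_pyRange_one] at hx
    simp [h x (by omega) (by omega)]

theorem pv_start_eq (lines : List String) (e : Int) (he : e ≤ (lines.length : Int) - 1) :
    ((PySem.List.pyRange e (-1) (-1)).find? (fun i => pvTopA (PySem.List.pyGetD lines i ""))).getD 0
    = (PySem.List.max? ((((PySem.List.enumerate lines).filter (fun p => pvTopB p.2)).map (·.1)).filter (fun t => decide (t ≤ e))) id).getD 0 := by
  set P : Int → Bool := fun i => pvTopA (PySem.List.pyGetD lines i "") with hPdef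
  set tops := ((PySem.List.enumerate lines).filter (fun p => pvTopB p.2)).map (·.1) with htops
  by_cases he0 : e < 0
  · rw [PySem.List.pyRange_neg_one_eq_nil (by omega)]
    have hfil : tops.filter (fun t => decide (t ≤ e)) = [] := by
      rw [List.filter_eq_nil_iff]
      intro t ht
      have hm := (pv_mem_tops lines t).mp ht
      simp
      omega
    rw [hfil]
    rfl
  · push_neg at he0
    have hk : ((e.toNat : Nat) : Int) = e := Int.toNat_of_nonneg he0
    cases hf : (PySem.List.pyRange e (-1) (-1)).find? P with
    | none =>
      rw [← hk, pv_find_down_none] at hf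
      have hfil : tops.filter (fun t => decide (t ≤ e)) = [] := by
        rw [List.filter_eq_nil_iff]
        intro t ht
        have hm := (pv_mem_tops lines t).mp ht
        simp
        by_contra hle
        push_neg at hle
        have hft : pvTopA (PySem.List.pyGetD lines t "") = false := hf t hm.1 (by omega)
        simp [hm.2.2] at hft
      rw [hfil]
      rfl
    | some i =>
      rw [← hk, pv_find_down_some, hk] at hf
      obtain ⟨h0, h1, hPi, hmax⟩ := hf
      have hi_tops : i ∈ tops := (pv_mem_tops lines i).mpr ⟨h0, by omega, hPi⟩
      have hi_fil : i ∈ tops.filter (fun t => decide (t ≤ e)) :=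
        List.mem_filter.mpr ⟨hi_tops, by simpa using h1⟩
      cases hm : PySem.List.max? (tops.filter (fun t => decide (t ≤ e))) id with
      | none =>
        rw [PySem.List.max?_eq_none_iff] at hm
        rw [hm] at hi_fil
        cases hi_fil
      | some m =>
        have hmm := PySem.List.max?_mem hm
        have hmtop := List.mem_filter.mp hmm
        have hmt := (pv_mem_tops lines m).mp hmtop.1
        have hle : m ≤ e := by simpa using hmtop.2
        have him : i ≤ m := by simpa using PySem.List.max?_isMax hm i hi_fil
        have hmi : m ≤ i := by
          by_contra hc
          push_neg at hc
          exact absurd hmt.2.2 (by simp [show pvTopA (PySem.List.pyGetD lines m "") = false from hmax m hc hle])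
        have : m = i := le_antisymm hmi him
        simp [this]

theorem pv_stop_eq (lines : List String) (s : Int) (hs0 : 0 ≤ s) (hs1 : s + 1 ≤ (lines.length : Int)) :
    ((PySem.List.pyRange (s + 1) ((lines.length : Int)) 1).find? (fun i => pvTopA (PySem.List.pyGetD lines i ""))).getD ((lines.length : Int))
    = (PySem.List.min? ((((PySem.List.enumerate lines).filter (fun p => pvTopB p.2)).map (·.1)).filter (fun t => decide (s < t))) id).getD ((lines.length : Int)) := by
  set P : Int → Bool := fun i => pvTopA (PySem.List.pyGetD lines i "") with hPdef
  set tops := ((PySem.List.enumerate lines).filter (fun p => pvTopB p.2)).map (·.1) with htops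
  cases hf : (PySem.List.pyRange (s + 1) ((lines.length : Int)) 1).find? P with
  | none =>
    rw [pv_find_up_none] at hf
    have hfil : tops.filter (fun t => decide (s < t)) = [] := by
      rw [List.filter_eq_nil_iff]
      intro t ht
      have hm := (pv_mem_tops lines t).mp ht
      simp
      by_contra hlt
      push_neg at hlt
      have hft : pvTopA (PySem.List.pyGetD lines t "") = false := hf t (by omega) hm.2.1
      simp [hm.2.2] at hft
    rw [hfil]
    rfl
  | some i =>
    rw [pv_find_up_some _ _ _ hs1] at hf
    obtain ⟨h0, h1, hPi, hmin⟩ := hf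
    have hi_tops : i ∈ tops := (pv_mem_tops lines i).mpr ⟨by omega, h1, hPi⟩
    have hi_fil : i ∈ tops.filter (fun t => decide (s < t)) :=
      List.mem_filter.mpr ⟨hi_tops, by simp; omega⟩
    cases hm : PySem.List.min? (tops.filter (fun t => decide (s < t))) id with
    | none =>
      rw [PySem.List.min?_eq_none_iff] at hm
      rw [hm] at hi_fil
      cases hi_fil
    | some m =>
      have hmm := PySem.List.min?_mem hm
      have hmtop := List.mem_filter.mp hmm
      have hmt := (pv_mem_tops lines m).mp hmtop.1
      have hlt : s < m := by simpa using hmtop.2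
      have him : m ≤ i := by simpa using PySem.List.min?_isMin hm i hi_fil
      have hmi : i ≤ m := by
        by_contra hc
        push_neg at hc
        exact absurd hmt.2.2 (by simp [show pvTopA (PySem.List.pyGetD lines m "") = false from hmin m (by omega) hc])
      have : m = i := le_antisymm him hmi
      simp [this]

theorem pv_startB_bounds (lines : List String) (e : Int) (hn : 0 < lines.length) :
    0 ≤ (PySem.List.max? ((((PySem.List.enumerate lines).filter (fun p => pvTopB p.2)).map (·.1)).filter (fun t => decide (t ≤ e))) id).getD 0
    ∧ (PySem.List.max? ((((PySem.List.enumerate lines).filter (fun p => pvTopB p.2)).map (·.1)).filter (fun t => decide (t ≤ e))) id).getD 0 < (lines.length : Int) := by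
  cases hm : PySem.List.max? ((((PySem.List.enumerate lines).filter (fun p => pvTopB p.2)).map (·.1)).filter (fun t => decide (t ≤ e))) id with
  | none => simp; omega
  | some m =>
    have hmm := PySem.List.max?_mem hm
    have hmt := (pv_mem_tops lines m).mp (List.mem_filter.mp hmm).1
    simp
    omega

theorem pv_main (source_code : String) (error_line : Int) :
    remove_bad_block_py source_code error_line = remove_bad_block_py_alt source_code error_line := by
  simp only [remove_bad_block_py, remove_bad_block_py_alt]
  by_cases hn : ((PySem.Str.splitlines source_code).length : Int) = 0
  · rw [if_pos hn, if_pos hn]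
  · rw [if_neg hn, if_neg hn]
    have hstart := pv_start_eq (PySem.Str.splitlines source_code)
      (min (error_line - 1) (((PySem.Str.splitlines source_code).length : Int) - 1))
      (min_le_right _ _)
    rw [hstart]
    have hb := pv_startB_bounds (PySem.Str.splitlines source_code)
      (min (error_line - 1) (((PySem.Str.splitlines source_code).length : Int) - 1))
      (by omega)
    rw [pv_stop_eq (PySem.Str.splitlines source_code) _ hb.1 (by omega)]

-- ===== VERDICT (by name: the statement is the Claim_ definition above) =====
theorem remove_bad_block_py_spec : Claim_equal_remove_bad_block_py := by
  intro source_code error_line _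
  unfold Spec_remove_bad_block_py
  exact pv_main source_code error_line
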